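-- pv_equiv track=rewrite | github.com/ForeverMJ/THEMIS | src/agents/developer.py | _resolve_symbol_name
-- ===== SOURCE A (Python) =====
-- def _resolve_symbol_name(symbol_table: dict[str, tuple[int, int, int]], raw_symbol: str) -> str:
--     symbol = raw_symbol.replace("::", ".").strip()
--     if not symbol:
--         raise ValueError("Developer returned empty symbol name.")
--     if symbol in symbol_table:
--         return symbol
--
--     # Fallback by leaf symbol (e.g. method name) when unique.
--     leaf = symbol.split(".")[-1]
--     candidates = [
--         name for name in symbol_table.keys() if name == leaf or name.endswith("." + leaf)
--     ]
--     if len(candidates) == 1: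
--         return candidates[0]
--     if not candidates:
--         raise ValueError(f"Developer proposed unknown symbol: {raw_symbol}")
--     raise ValueError(
--         f"Developer proposed ambiguous symbol: {raw_symbol}. Candidates: {', '.join(sorted(candidates)[:8])}"
--     )
-- ===== SOURCE B (Python) =====
-- def _resolve_symbol_name(symbol_table: dict[str, tuple[int, int, int]], raw_symbol: str) -> str:
--     symbol = raw_symbol.replace("::", ".").strip()
--     if not symbol:
--         raise ValueError("Developer returned empty symbol name.")
--
--     # Single pass with an accumulator: return on an exact key hit, otherwise
--     # remember the first name whose last dotted component equals the symbol's
--     # and count how many there are (same-leaf equals A's suffix test).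
--     leaf = symbol.rsplit(".", 1)[-1]
--     hit, count = None, 0
--     for name in symbol_table:
--         if name == symbol:
--             return symbol
--         if name.rsplit(".", 1)[-1] == leaf:
--             if hit is None:
--                 hit = name
--             count += 1
--     if count == 1:
--         return hit
--     if count == 0:
--         raise ValueError(f"Developer proposed unknown symbol: {raw_symbol}")
--     cands = sorted(name for name in symbol_table if name.rsplit(".", 1)[-1] == leaf)
--     raise ValueError(
--         f"Developer proposed ambiguous symbol: {raw_symbol}. Candidates: {', '.join(cands[:8])}"
--     )
-- ===== Notes on version B (the rewrite author's own statement) =====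
-- stated objective: alternative
-- what changed: B replaces A's membership check plus full filter-then-count over the keys by a single pass with an accumulator that returns early on an exact key hit and otherwise tracks the first and the count of names whose last dotted component equals the symbol's (which is exactly A's suffix test).
import Mathlib
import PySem

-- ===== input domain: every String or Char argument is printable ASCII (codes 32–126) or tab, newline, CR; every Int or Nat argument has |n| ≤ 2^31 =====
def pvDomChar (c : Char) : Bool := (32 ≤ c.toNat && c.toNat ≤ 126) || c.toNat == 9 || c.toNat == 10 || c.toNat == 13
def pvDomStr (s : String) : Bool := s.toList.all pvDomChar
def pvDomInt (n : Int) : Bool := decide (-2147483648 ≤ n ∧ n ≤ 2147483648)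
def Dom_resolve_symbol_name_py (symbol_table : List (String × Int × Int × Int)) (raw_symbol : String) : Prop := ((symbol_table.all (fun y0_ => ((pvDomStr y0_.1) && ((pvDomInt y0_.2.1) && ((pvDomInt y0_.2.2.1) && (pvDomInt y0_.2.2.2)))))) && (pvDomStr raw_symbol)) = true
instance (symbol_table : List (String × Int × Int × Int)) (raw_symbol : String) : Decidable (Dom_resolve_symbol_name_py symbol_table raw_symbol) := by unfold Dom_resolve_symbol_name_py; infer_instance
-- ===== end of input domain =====

-- B resolves in one pass with an accumulator (early exact-key return, first match +
-- count of equal-leaf names) instead of A's membership check plus filter-and-count;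
-- equivalence is about the RETURN value (both raise ValueError outside Pre_, where
-- both ports return "").

-- A-side helper: symbol.split(".")[-1] (split? with a nonempty separator always
-- returns some nonempty list, so the [-1] index is the last element; exact)
def pvLeafPy (s : String) : String :=
  ((((PySem.Str.split? s ".").getD []).getLast?).getD "")

-- ===== PORT A =====
def resolve_symbol_name_py (symbol_table : List (String × Int × Int × Int)) (raw_symbol : String) : String :=
  let symbol := PySem.Str.strip (PySem.Str.replace raw_symbol "::" ".")
  if symbol = "" then ""   -- A raises ValueError (excluded by Pre_)
  else
    let keys := PySem.List.dedup (symbol_table.map Prod.fst)   -- the dict's keys, in first-insertion order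
    if keys.contains symbol then symbol
    else
      let leaf := pvLeafPy symbol
      let candidates := keys.filter (fun name => name == leaf || PySem.Str.endswith name ("." ++ leaf))
      if candidates.length = 1 then candidates.headD ""
      else ""   -- A raises ValueError (unknown or ambiguous; excluded by Pre_)

-- ===== PORT B =====
-- B-side helper: s.rsplit(".", 1)[-1], ported by hand over List Char: the characters
-- after the last '.' (the whole string if no dot) — exact on all inputs.
def pvLeafB (s : String) : String :=
  String.ofList ((s.toList.reverse.takeWhile (fun c => c != '.')).reverse)

-- B's for-loop: early return on exact key, else track first equal-leaf name and count
def pvResolveLoop (symbol leaf : String) : List String → Option String → Nat → String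
  | [], hit, count =>
      if count = 1 then hit.getD "" else ""   -- count 0 / ≥ 2: B raises ValueError (excluded by Pre_)
  | name :: rest, hit, count =>
      if name = symbol then symbol
      else if pvLeafB name = leaf then
        pvResolveLoop symbol leaf rest (some (hit.getD name)) (count + 1)
      else pvResolveLoop symbol leaf rest hit count

def resolve_symbol_name_py_alt (symbol_table : List (String × Int × Int × Int)) (raw_symbol : String) : String :=
  let symbol := PySem.Str.strip (PySem.Str.replace raw_symbol "::" ".")
  if symbol = "" then ""   -- B raises ValueError (excluded by Pre_)
  else
    pvResolveLoop symbol (pvLeafB symbol)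
      (PySem.List.dedup (symbol_table.map Prod.fst)) none 0

-- ===== PRECONDITION & SPEC =====
-- Pre_ excludes exactly the inputs on which A raises ValueError: an empty normalized
-- symbol, or a symbol that is not a key and whose leaf matches zero or ≥ 2 keys.
def Pre_resolve_symbol_name_py (symbol_table : List (String × Int × Int × Int)) (raw_symbol : String) : Prop :=
  let symbol := PySem.Str.strip (PySem.Str.replace raw_symbol "::" ".")
  let keys := PySem.List.dedup (symbol_table.map Prod.fst)
  symbol ≠ "" ∧ (keys.contains symbol = true ∨
    (keys.countP (fun name => pvLeafPy name == pvLeafPy symbol)) = 1)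
instance (symbol_table : List (String × Int × Int × Int)) (raw_symbol : String) : Decidable (Pre_resolve_symbol_name_py symbol_table raw_symbol) := by unfold Pre_resolve_symbol_name_py; infer_instance
def pvWitness_resolve_symbol_name_py : (List (String × Int × Int × Int)) × String := ([("pkg.mod.f", 1, 2, 3), ("pkg.mod.g", 4, 5, 6)], "f")
def Spec_resolve_symbol_name_py (symbol_table : List (String × Int × Int × Int)) (raw_symbol : String) (out : String) : Prop := out = resolve_symbol_name_py_alt symbol_table raw_symbol
instance (symbol_table : List (String × Int × Int × Int)) (raw_symbol : String) (out : String) : Decidable (Spec_resolve_symbol_name_py symbol_table raw_symbol out) := by unfold Spec_resolve_symbol_name_py; infer_instance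

-- ===== CLAIM (what is proved, stated in full; the proofs are below) =====
def Claim_equal_resolve_symbol_name_py : Prop := ∀ (symbol_table : List (String × Int × Int × Int)) (raw_symbol : String), Dom_resolve_symbol_name_py symbol_table raw_symbol → Pre_resolve_symbol_name_py symbol_table raw_symbol → Spec_resolve_symbol_name_py symbol_table raw_symbol (resolve_symbol_name_py symbol_table raw_symbol)

-- ===== LEMMAS AND PROOFS =====

-- the last dotted component of a character list, by structural recursion
def pvLeafChars : List Char → List Char
  | [] => []
  | c :: rest => if '.' ∈ rest then pvLeafChars rest else if c = '.' then rest else c :: rest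

theorem pvLeafChars_no_dot (cs : List Char) : '.' ∉ pvLeafChars cs := by
  induction cs with
  | nil => simp [pvLeafChars]
  | cons c rest ih =>
    by_cases h : '.' ∈ rest
    · simpa [pvLeafChars, h] using ih
    · by_cases hc : c = '.'
      · simp [pvLeafChars, h, hc]
      · simp [pvLeafChars, h, hc, Ne.symm hc]

theorem pvLeafChars_of_no_dot (cs : List Char) (h : '.' ∉ cs) : pvLeafChars cs = cs := by
  cases cs with
  | nil => rfl
  | cons c rest =>
    simp only [List.mem_cons, not_or] at h
    simp [pvLeafChars, h.2, Ne.symm h.1]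

theorem pv_go_getLast? (fuel : ℕ) : ∀ (l cur : List Char) (accs : List (List Char)),
    l.length ≤ fuel →
    (PySem.Chars.splitOn.go ['.'] fuel l cur accs).getLast? =
      some (if '.' ∈ l then pvLeafChars l else cur.reverse ++ l) := by
  induction fuel with
  | zero =>
    intro l cur accs h
    have hl : l = [] := by cases l <;> simp_all
    subst hl
    simp [PySem.Chars.splitOn.go]
  | succ n ih =>
    intro l cur accs h
    cases l with
    | nil => simp [PySem.Chars.splitOn.go]
    | cons c rest =>
      by_cases hc : c = '.'
      · subst hc
        have hpre : List.isPrefixOf ['.'] ('.' :: rest) = true := by simp [List.isPrefixOf]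
        rw [show PySem.Chars.splitOn.go ['.'] (n+1) ('.' :: rest) cur accs
              = PySem.Chars.splitOn.go ['.'] n (List.drop 1 ('.' :: rest)) [] (cur.reverse :: accs) by
            simp [PySem.Chars.splitOn.go, hpre]]
        simp only [List.drop_one, List.tail_cons]
        rw [ih rest [] (cur.reverse :: accs) (by simpa using Nat.le_of_succ_le_succ (by simpa using h))]
        by_cases hr : '.' ∈ rest
        · simp [pvLeafChars, hr]
        · simp [pvLeafChars, hr]
      · have hpre : List.isPrefixOf ['.'] (c :: rest) = false := by
          simp [List.isPrefixOf, Ne.symm hc]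
        rw [show PySem.Chars.splitOn.go ['.'] (n+1) (c :: rest) cur accs
              = PySem.Chars.splitOn.go ['.'] n rest (c :: cur) accs by
            simp [PySem.Chars.splitOn.go, hpre]]
        rw [ih rest (c :: cur) accs (by simpa using Nat.le_of_succ_le_succ (by simpa using h))]
        by_cases hr : '.' ∈ rest
        · simp [pvLeafChars, hr]
        · simp [hr, Ne.symm hc]

theorem pv_splitOn_getLast? (cs : List Char) :
    (PySem.Chars.splitOn cs ['.']).getLast? = some (pvLeafChars cs) := by
  unfold PySem.Chars.splitOn
  rw [pv_go_getLast? (cs.length + 1) cs [] [] (Nat.le_succ _)]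
  by_cases h : '.' ∈ cs
  · simp [h]
  · simp [h, pvLeafChars_of_no_dot cs h]

theorem pvLeaf_toList (s : String) : (pvLeafPy s).toList = pvLeafChars s.toList := by
  have hmap := PySem.Str.split?_map s "."
  have hsep : ("." : String).toList = ['.'] := by decide
  rw [hsep] at hmap
  cases hp : PySem.Str.split? s "." with
  | none => rw [hp] at hmap; simp [PySem.Chars.split?] at hmap
  | some parts =>
    rw [hp] at hmap
    have hmap' : List.map String.toList parts = PySem.Chars.splitOn s.toList ['.'] := by
      simpa [PySem.Chars.split?] using hmap
    have hlast : (List.map String.toList parts).getLast? = some (pvLeafChars s.toList) := by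
      rw [hmap']; exact pv_splitOn_getLast? s.toList
    rw [List.getLast?_map] at hlast
    cases hq : parts.getLast? with
    | none => rw [hq] at hlast; simp at hlast
    | some t =>
      rw [hq] at hlast
      simp only [Option.map_some, Option.some.injEq] at hlast
      simp [pvLeafPy, hp, hq, hlast]

-- B's reverse/takeWhile leaf is the same last dotted component
theorem pv_tw_snoc_mem (xs : List Char) (c : Char) (h : '.' ∈ xs) :
    ((xs ++ [c]).takeWhile (fun c => c != '.')) = xs.takeWhile (fun c => c != '.') := by
  induction xs with
  | nil => cases h
  | cons a as ih =>
    by_cases ha : a = '.'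
    · simp [List.takeWhile, ha]
    · have h' : '.' ∈ as := by
        rcases List.mem_cons.mp h with h1 | h1
        · exact absurd h1.symm ha
        · exact h1
      have hb : (a != '.') = true := bne_iff_ne.mpr ha
      simp [List.takeWhile, hb, ih h']

theorem pv_tw_snoc_nomem (xs : List Char) (c : Char) (h : '.' ∉ xs) :
    ((xs ++ [c]).takeWhile (fun c => c != '.')) = xs ++ [c].takeWhile (fun c => c != '.') := by
  induction xs with
  | nil => simp
  | cons a as ih =>
    have ha : a ≠ '.' := fun he => h (he ▸ List.mem_cons_self)
    have h' : '.' ∉ as := fun hm => h (List.mem_cons_of_mem _ hm)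
    simp [List.takeWhile, ha, ih h']

theorem pv_takeWhile_rev (cs : List Char) :
    (cs.reverse.takeWhile (fun c => c != '.')).reverse = pvLeafChars cs := by
  induction cs with
  | nil => simp [pvLeafChars]
  | cons c rest ih =>
    rw [List.reverse_cons]
    by_cases hr : '.' ∈ rest
    · rw [pv_tw_snoc_mem _ _ (List.mem_reverse.mpr hr), ih]
      simp [pvLeafChars, hr]
    · rw [pv_tw_snoc_nomem _ _ (fun hm => hr (List.mem_reverse.mp hm))]
      have hself : rest.reverse.takeWhile (fun c => c != '.') = rest.reverse := by
        apply List.takeWhile_eq_self_iff.mpr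
        intro x hx
        simp only [bne_iff_ne, ne_eq]
        intro hxe; exact hr (List.mem_reverse.mp (hxe ▸ hx))
      by_cases hc : c = '.'
      · simp [List.takeWhile, hc, hself, pvLeafChars, hr]
      · have hb : (c != '.') = true := bne_iff_ne.mpr hc
        simp [List.takeWhile, hb, hself, pvLeafChars, hr, hc]

theorem pvLeafB_eq (s : String) : pvLeafB s = pvLeafPy s := by
  apply String.toList_inj.mp
  rw [pvLeaf_toList, pvLeafB, String.toList_ofList]
  exact pv_takeWhile_rev s.toList

-- A's per-name test equals "same last dotted component"
theorem pvLeafChars_eq_iff (cs leaf : List Char) (hl : '.' ∉ leaf) :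
    pvLeafChars cs = leaf ↔ cs = leaf ∨ ('.' :: leaf) <:+ cs := by
  induction cs with
  | nil =>
    simp only [pvLeafChars]
    constructor
    · intro h; exact Or.inl h
    · rintro (h | h)
      · exact h
      · exact absurd (List.eq_nil_of_suffix_nil h) (by simp)
  | cons c rest ih =>
    by_cases hr : '.' ∈ rest
    · have h1 : c :: rest ≠ leaf := by
        intro h; exact hl (h ▸ List.mem_cons_of_mem c hr)
      have h2 : '.' :: leaf ≠ c :: rest := by
        intro h
        have : leaf = rest := (List.cons.injEq _ _ _ _ ▸ h).2
        exact hl (this ▸ hr)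
      have h3 : rest ≠ leaf := by
        intro h; exact hl (h ▸ hr)
      simp only [pvLeafChars, hr, if_true, List.suffix_cons_iff]
      rw [ih]
      constructor
      · rintro (h | h)
        · exact absurd h h3
        · exact Or.inr (Or.inr h)
      · rintro (h | h | h)
        · exact absurd h h1
        · exact absurd h h2
        · exact Or.inr h
    · by_cases hc : c = '.'
      · subst hc
        have h1 : '.' :: rest ≠ leaf := by
          intro h; exact hl (h ▸ List.mem_cons_self)
        have h2 : ¬ ('.' :: leaf) <:+ rest := by
          intro h; exact hr (h.subset List.mem_cons_self)
        simp only [pvLeafChars, hr, if_false, if_true, List.suffix_cons_iff]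
        constructor
        · intro h; subst h; exact Or.inr (Or.inl rfl)
        · rintro (h | h | h)
          · exact absurd h h1
          · exact ((List.cons.injEq _ _ _ _ ▸ h).2).symm
          · exact absurd h h2
      · have h2 : '.' :: leaf ≠ c :: rest := by
          intro h; exact hc ((List.cons.injEq _ _ _ _ ▸ h).1).symm
        have h3 : ¬ ('.' :: leaf) <:+ rest := by
          intro h; exact hr (h.subset List.mem_cons_self)
        simp only [pvLeafChars, hr, if_false, hc, List.suffix_cons_iff]
        constructor
        · intro h; exact Or.inl h
        · rintro (h | h | h)
          · exact h
          · exact absurd h h2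
          · exact absurd h h3

theorem pv_pred_eq (symbol name : String) :
    (name == pvLeafPy symbol || PySem.Str.endswith name ("." ++ pvLeafPy symbol))
      = (pvLeafPy name == pvLeafPy symbol) := by
  have hnd : '.' ∉ (pvLeafPy symbol).toList := by
    rw [pvLeaf_toList]; exact pvLeafChars_no_dot _
  have hdot : ("." ++ pvLeafPy symbol).toList = '.' :: (pvLeafPy symbol).toList := by
    simp
  rw [PySem.Str.endswith_eq, hdot]
  have hiff := pvLeafChars_eq_iff name.toList (pvLeafPy symbol).toList hnd
  rw [← pvLeaf_toList] at hiff
  rw [Bool.eq_iff_iff]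
  simp only [Bool.or_eq_true, beq_iff_eq, PySem.Chars.endswith, List.isSuffixOf_iff_suffix]
  constructor
  · rintro (h | h)
    · exact String.toList_inj.mp (hiff.mpr (Or.inl (congrArg String.toList h)))
    · exact String.toList_inj.mp (hiff.mpr (Or.inr h))
  · intro h
    rcases hiff.mp (congrArg String.toList h) with h2 | h2
    · exact Or.inl (String.toList_inj.mp h2)
    · exact Or.inr h2

-- the loop returns the symbol as soon as it occurs among the keys
theorem pv_loop_exact (symbol leaf : String) (keys : List String)
    (hit : Option String) (count : Nat) (hm : symbol ∈ keys) :
    pvResolveLoop symbol leaf keys hit count = symbol := by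
  induction keys generalizing hit count with
  | nil => cases hm
  | cons name rest ih =>
    by_cases hn : name = symbol
    · simp [pvResolveLoop, hn]
    · have hm' : symbol ∈ rest := by
        rcases List.mem_cons.mp hm with h | h
        · exact absurd h.symm hn
        · exact h
      by_cases hl : pvLeafB name = leaf
      · simp [pvResolveLoop, hn, hl, ih _ _ hm']
      · simp [pvResolveLoop, hn, hl, ih _ _ hm']

-- with no exact key, the loop computes first-match-and-count of the filtered keys
theorem pv_loop_no_exact (symbol leaf : String) (keys : List String)
    (hit : Option String) (count : Nat) (hns : symbol ∉ keys)
    (hinv : hit = none ↔ count = 0) :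
    pvResolveLoop symbol leaf keys hit count =
      (if count + (keys.filter (fun n => pvLeafB n = leaf)).length = 1
       then hit.getD ((keys.filter (fun n => pvLeafB n = leaf)).headD "") else "") := by
  induction keys generalizing hit count with
  | nil =>
    simp only [pvResolveLoop, List.filter_nil, List.length_nil, Nat.add_zero, List.headD_nil]
  | cons name rest ih =>
    have hn : name ≠ symbol := fun h => hns (h ▸ List.mem_cons_self)
    have hns' : symbol ∉ rest := fun h => hns (List.mem_cons_of_mem _ h)
    by_cases hl : pvLeafB name = leaf
    · rw [show pvResolveLoop symbol leaf (name :: rest) hit count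
            = pvResolveLoop symbol leaf rest (some (hit.getD name)) (count + 1) by
          simp [pvResolveLoop, hn, hl]]
      rw [ih _ _ hns' (by simp)]
      have hf : (name :: rest).filter (fun n => pvLeafB n = leaf)
          = name :: rest.filter (fun n => pvLeafB n = leaf) := by
        simp [List.filter_cons, hl]
      rw [hf]
      simp only [List.length_cons]
      by_cases hc : count + (rest.filter (fun n => pvLeafB n = leaf)).length + 1 = 1
      · have hc0 : count = 0 := by omega
        have hhit : hit = none := hinv.mpr hc0
        rw [if_pos (by omega), if_pos (by omega)]
        subst hhit; rfl
      · rw [if_neg (by omega), if_neg (by omega)]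
    · rw [show pvResolveLoop symbol leaf (name :: rest) hit count
            = pvResolveLoop symbol leaf rest hit count by
          simp [pvResolveLoop, hn, hl]]
      rw [ih _ _ hns' hinv]
      have hf : (name :: rest).filter (fun n => pvLeafB n = leaf)
          = rest.filter (fun n => pvLeafB n = leaf) := by
        simp [List.filter_cons, hl]
      rw [hf]

-- ===== VERDICT (by name: the statement is the Claim_ definition above) =====
set_option maxHeartbeats 1000000 in
theorem resolve_symbol_name_py_spec : Claim_equal_resolve_symbol_name_py := by
  intro symbol_table raw_symbol _hdom _hpre
  unfold Spec_resolve_symbol_name_py resolve_symbol_name_py resolve_symbol_name_py_alt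
  by_cases h1 : PySem.Str.strip (PySem.Str.replace raw_symbol "::" ".") = ""
  · simp [h1]
  · simp only [h1, if_false]
    by_cases h2 : (PySem.List.dedup (symbol_table.map Prod.fst)).contains
        (PySem.Str.strip (PySem.Str.replace raw_symbol "::" ".")) = true
    · rw [if_pos h2,
        pv_loop_exact _ _ _ _ _ (List.contains_iff_mem.mp h2)]
    · rw [if_neg h2]
      have hns : PySem.Str.strip (PySem.Str.replace raw_symbol "::" ".") ∉
          PySem.List.dedup (symbol_table.map Prod.fst) :=
        fun h => h2 (List.contains_iff_mem.mpr h)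
      rw [pv_loop_no_exact _ _ _ _ _ hns (by simp)]
      have hfe : (PySem.List.dedup (symbol_table.map Prod.fst)).filter
            (fun name => name == pvLeafPy (PySem.Str.strip (PySem.Str.replace raw_symbol "::" "."))
              || PySem.Str.endswith name ("." ++ pvLeafPy (PySem.Str.strip (PySem.Str.replace raw_symbol "::" "."))))
          = (PySem.List.dedup (symbol_table.map Prod.fst)).filter
            (fun n => pvLeafB n = pvLeafB (PySem.Str.strip (PySem.Str.replace raw_symbol "::" "."))) := by
        apply List.filter_congr
        intro x _
        rw [pv_pred_eq, pvLeafB_eq, pvLeafB_eq, Bool.eq_iff_iff]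
        simp
      rw [hfe]
      simp only [Nat.zero_add, Option.getD_none]
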